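-- pv_equiv track=rewrite | github.com/Almiqdad/Equation--Solver | github code.py | numAfter
-- ===== SOURCE A (Python) =====
-- def numAfter(index,string):
--     #define possible digits
--     digits = ['0','1','2','3','4','5','6','7','8','9','.','/','*']
--     #initialize string to contain the resulting number
--     number = ''
--     #get the portion of the string am interested in
--     subString = string[index+1:]
--     #go from the index to the end of the string
--     for i in range(len(subString)):
--         #if you find a digit, add it to number string
--         if subString[i] in digits:
--             number = number+subString[i]
--         #if you find something that's not a digit, return whatever is in the number
--         #string
--         else:
--             return number
--     return number
-- ===== SOURCE B (Python) =====
-- def _take(s):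
--     # maximal allowed prefix, built front-to-back by recursion
--     if s and s[0] in '0123456789./*':
--         return s[0] + _take(s[1:])
--     return ''
--
-- def numAfter(index, string):
--     return _take(string[index + 1:])
-- ===== Notes on version B (the rewrite author's own statement) =====
-- stated objective: alternative
-- what changed: Replaces A's index loop with a string accumulator and mid-loop early return by a recursive take-prefix helper that builds the result front-to-back by cons/concat on the tail.
import Mathlib
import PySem

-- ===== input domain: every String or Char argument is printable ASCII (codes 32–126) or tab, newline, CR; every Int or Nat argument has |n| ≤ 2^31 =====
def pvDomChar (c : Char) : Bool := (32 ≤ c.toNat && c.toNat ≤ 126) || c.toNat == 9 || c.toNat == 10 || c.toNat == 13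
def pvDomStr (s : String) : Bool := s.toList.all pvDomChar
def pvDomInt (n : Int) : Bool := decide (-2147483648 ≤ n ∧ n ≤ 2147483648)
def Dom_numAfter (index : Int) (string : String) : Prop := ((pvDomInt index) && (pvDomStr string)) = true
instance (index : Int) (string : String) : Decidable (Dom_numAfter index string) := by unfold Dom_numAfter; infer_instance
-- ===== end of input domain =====

-- B replaces A's index loop + string accumulator + early return by a recursive
-- take-prefix helper building the result front-to-back (alternative decomposition, same cost).


-- ===== PORT A =====
-- digits = ['0','1','2','3','4','5','6','7','8','9','.','/','*']
def numAfterDigits : List Char := ['0','1','2','3','4','5','6','7','8','9','.','/','*']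

-- the 'for i in range(len(subString))' loop over subString with accumulator `number`
-- and mid-loop early return; `number + subString[i]` is `acc ++ [c]`
def numAfterLoop : List Char → List Char → List Char
  | [], acc => acc
  | c :: rest, acc => if c ∈ numAfterDigits then numAfterLoop rest (acc ++ [c]) else acc

def numAfter (index : Int) (string : String) : String :=
  -- subString = string[index+1:]
  let subString := PySem.List.slice string.toList (some (index + 1)) none
  String.ofList (numAfterLoop subString [])

-- ===== PORT B =====
-- _take(s): recursive maximal allowed prefix; `s[0] in '0123456789./*'` is single-char
-- membership in that string's characters (exact: Python substring test on a 1-char needle)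
def numAfterTake : List Char → List Char
  | [] => []
  | c :: rest => if c ∈ "0123456789./*".toList then c :: numAfterTake rest else []

def numAfter_alt (index : Int) (string : String) : String :=
  String.ofList (numAfterTake (PySem.List.slice string.toList (some (index + 1)) none))

-- ===== PRECONDITION & SPEC =====
def Spec_numAfter (index : Int) (string : String) (out : String) : Prop := out = numAfter_alt index string
instance (index : Int) (string : String) (out : String) : Decidable (Spec_numAfter index string out) := by unfold Spec_numAfter; infer_instance

-- ===== CLAIM (what is proved, stated in full; the proofs are below) =====
def Claim_equal_numAfter : Prop := ∀ (index : Int) (string : String), Dom_numAfter index string → Spec_numAfter index string (numAfter index string)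

-- ===== LEMMAS AND PROOFS =====
lemma numAfterTake_chars : "0123456789./*".toList = numAfterDigits := by decide

lemma numAfterLoop_eq_take (l acc : List Char) :
    numAfterLoop l acc = acc ++ numAfterTake l := by
  induction l generalizing acc with
  | nil => simp [numAfterLoop, numAfterTake]
  | cons c rest ih =>
    by_cases h : c ∈ numAfterDigits
    · simp [numAfterLoop, numAfterTake, numAfterTake_chars, h, ih]
    · simp [numAfterLoop, numAfterTake, numAfterTake_chars, h]

-- ===== VERDICT (by name: the statement is the Claim_ definition above) =====
theorem numAfter_spec : Claim_equal_numAfter := by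
  intro index string _
  unfold Spec_numAfter numAfter numAfter_alt
  simp [numAfterLoop_eq_take]
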